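-- pv_equiv track=rewrite | github.com/samirelanduk/totalwar | rs/military.py | is_delim
-- ===== SOURCE A (Python) =====
-- def is_delim(bytestring):
--     delim = True
--     pos = 0
--     for char in bytestring:
--         if char == 1 or char == 2 or char == 3 or char == 255 or (char == 0 and pos != 0 and pos != len(bytestring)-1):
--             pass
--         else:
--             delim = False
--             break
--         pos += 1
--     return delim
-- ===== SOURCE B (Python) =====
-- def is_delim(bytestring):
--     # Tally-based validation: the five legal byte values must account for the
--     # whole length (so no other byte occurs), and 0 must not occur at either end.
--     tally = (bytestring.count(0) + bytestring.count(1) + bytestring.count(2)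
--              + bytestring.count(3) + bytestring.count(255))
--     return (tally == len(bytestring)
--             and 0 not in bytestring[:1]
--             and 0 not in bytestring[-1:])
-- ===== Notes on version B (the rewrite author's own statement) =====
-- stated objective: alternative
-- what changed: Replaces A's position-tracking short-circuit scan by a counting argument: the counts of the five legal byte values must sum to the length (so no illegal byte occurs), plus slice-based checks that 0 is absent from the one-element end slices.
import Mathlib
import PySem

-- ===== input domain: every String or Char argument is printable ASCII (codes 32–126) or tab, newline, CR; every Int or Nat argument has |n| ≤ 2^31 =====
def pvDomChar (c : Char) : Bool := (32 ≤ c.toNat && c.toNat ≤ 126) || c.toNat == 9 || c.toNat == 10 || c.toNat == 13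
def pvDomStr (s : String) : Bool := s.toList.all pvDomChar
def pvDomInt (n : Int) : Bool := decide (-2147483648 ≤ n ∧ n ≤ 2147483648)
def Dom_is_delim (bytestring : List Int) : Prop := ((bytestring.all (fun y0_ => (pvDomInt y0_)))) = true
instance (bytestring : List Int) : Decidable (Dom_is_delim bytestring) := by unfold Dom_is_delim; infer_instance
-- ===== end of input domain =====

-- B replaces A's position-tracking short-circuit scan by a counting argument (five counts must sum to the length) plus slice checks on the ends; objective: alternative.


-- ===== PORT A =====
-- loop over the remaining suffix, tracking pos; returning false models the break with delim = False
def is_delim_loop (bytestring : List Int) (pos : Int) : List Int → Bool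
  | [] => true
  | c :: rest =>
      if c == 1 || c == 2 || c == 3 || c == 255 ||
         (c == 0 && pos != 0 && pos != (bytestring.length : Int) - 1) then
        is_delim_loop bytestring (pos + 1) rest
      else
        false

def is_delim (bytestring : List Int) : Bool :=
  is_delim_loop bytestring 0 bytestring

-- ===== PORT B =====
def is_delim_alt (bytestring : List Int) : Bool :=
  let tally := bytestring.count 0 + bytestring.count 1 + bytestring.count 2 +
               bytestring.count 3 + bytestring.count 255
  (tally == bytestring.length) &&
  !((PySem.List.slice bytestring none (some 1)).contains 0) &&
  !((PySem.List.slice bytestring (some (-1)) none).contains 0)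

-- ===== PRECONDITION & SPEC =====
def Spec_is_delim (bytestring : List Int) (out : Bool) : Prop := out = is_delim_alt bytestring
instance (bytestring : List Int) (out : Bool) : Decidable (Spec_is_delim bytestring out) := by unfold Spec_is_delim; infer_instance

-- ===== CLAIM (what is proved, stated in full; the proofs are below) =====
def Claim_equal_is_delim : Prop := ∀ (bytestring : List Int), Dom_is_delim bytestring → Spec_is_delim bytestring (is_delim bytestring)

-- ===== LEMMAS AND PROOFS =====

def pvGood0 (b : Int) : Bool := b == 0 || b == 1 || b == 2 || b == 3 || b == 255

def pvGood (b : Int) : Bool := b == 1 || b == 2 || b == 3 || b == 255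

-- common characterisation both programs are reduced to
def pvChar (bs : List Int) : Bool :=
  bs.all pvGood0 && (bs.isEmpty || (bs.headI != 0 && bs.getLastD 0 != 0))

theorem pvGood_eq (b : Int) : pvGood b = (pvGood0 b && b != 0) := by
  unfold pvGood pvGood0
  by_cases h : b = 0
  · subst h; decide
  · have h0 : (b == 0) = false := by simp [h]
    have h1 : (b != 0) = true := by simp [h]
    rw [h0, h1]
    simp

-- ---- A = pvChar ----

theorem is_delim_loop_char (bs : List Int) (l : List Int) (pos : Int)
    (h0 : l ≠ []) (h1 : 1 ≤ pos) (h2 : pos + l.length = (bs.length : Int)) :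
    is_delim_loop bs pos l = (l.dropLast.all pvGood0 && pvGood (l.getLastD 0)) := by
  induction l generalizing pos with
  | nil => exact absurd rfl h0
  | cons c rest ih =>
    simp only [is_delim_loop]
    have hpos0 : pos ≠ 0 := by omega
    cases rest with
    | nil =>
      have hlast : pos = (bs.length : Int) - 1 := by simp at h2; omega
      simp only [hlast, List.dropLast, List.all_nil, List.getLastD, Bool.true_and, pvGood]
      by_cases h1' : c = 1 <;> by_cases h2' : c = 2 <;> by_cases h3' : c = 3 <;>
        by_cases h4' : c = 255 <;> simp_all [is_delim_loop]
    | cons d rest' =>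
      have hne : pos ≠ (bs.length : Int) - 1 := by simp at h2; omega
      have ih' := ih (pos + 1) (List.cons_ne_nil d rest') (by omega) (by simp at h2 ⊢; omega)
      by_cases hc : pvGood0 c = true
      · have hcond : (c == 1 || c == 2 || c == 3 || c == 255 ||
            (c == 0 && pos != 0 && pos != (bs.length : Int) - 1)) = true := by
          unfold pvGood0 at hc
          simp [hpos0, hne] at hc ⊢
          tauto
        rw [hcond, if_pos rfl, ih']
        simp [hc]
      · have hcond : (c == 1 || c == 2 || c == 3 || c == 255 ||
            (c == 0 && pos != 0 && pos != (bs.length : Int) - 1)) = false := by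
          unfold pvGood0 at hc
          simp at hc ⊢
          tauto
        rw [hcond]
        simp [hc]

theorem all_dropLast_last (l : List Int) (hl : l ≠ []) :
    (l.dropLast.all pvGood0 && pvGood0 (l.getLastD 0)) = l.all pvGood0 := by
  conv_rhs => rw [← List.dropLast_append_getLast hl]
  simp [List.getLastD_eq_getLast?, List.getLast?_eq_some_getLast hl]

theorem all_split (d : Int) (r : List Int) :
    (d :: r).all pvGood0 = ((d :: r).dropLast.all pvGood0 && pvGood0 (r.getLastD d)) := by
  rw [← all_dropLast_last (d :: r) (List.cons_ne_nil d r), List.getLastD_cons]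

theorem char_cons (c : Int) (tail : List Int) (h : tail ≠ []) :
    pvChar (c :: tail) =
      (pvGood c && (tail.dropLast.all pvGood0 && pvGood (tail.getLastD 0))) := by
  cases tail with
  | nil => exact absurd rfl h
  | cons d r =>
    simp only [pvChar, List.all_cons, List.isEmpty_cons, List.headI,
      List.getLastD_cons, Bool.false_or]
    rw [pvGood_eq c, pvGood_eq (r.getLastD d)]
    have hs := all_split d r
    simp only [List.all_cons] at hs
    rw [hs]
    by_cases hc0 : c = 0 <;> by_cases hz : r.getLastD d = 0 <;>
      cases pvGood0 c <;> cases (d :: r).dropLast.all pvGood0 <;>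
      cases pvGood0 (r.getLastD d) <;> simp_all

theorem a_eq_char (bs : List Int) : is_delim bs = pvChar bs := by
  cases bs with
  | nil => decide
  | cons c rest =>
    have hA : is_delim (c :: rest) =
        (pvGood c && is_delim_loop (c :: rest) 1 rest) := by
      simp only [is_delim, is_delim_loop, pvGood]
      cases hc : (c == 1 || c == 2 || c == 3 || c == 255) <;> simp
    cases rest with
    | nil =>
      rw [hA]
      simp only [is_delim_loop, Bool.and_true, pvChar, List.all_cons,
        List.all_nil, List.isEmpty_cons, List.headI, List.getLastD, Bool.false_or,
        Bool.and_true]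
      rw [pvGood_eq c]
      simp
    | cons d rest' =>
      rw [hA, is_delim_loop_char (c :: d :: rest') (d :: rest') 1 (by simp)
        (by omega) (by simp; omega),
        char_cons c (d :: rest') (by simp)]

-- ---- B = pvChar ----

-- adding one element adds 1 to the tally exactly when it is a legal byte
theorem tally_step (c : Int) (t : List Int) :
    (c :: t).count 0 + (c :: t).count 1 + (c :: t).count 2 + (c :: t).count 3 +
      (c :: t).count 255 =
    (t.count 0 + t.count 1 + t.count 2 + t.count 3 + t.count 255) +
      (if pvGood0 c = true then 1 else 0) := by
  simp only [List.count_cons]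
  unfold pvGood0
  by_cases h0 : c = 0 <;> by_cases h1 : c = 1 <;> by_cases h2 : c = 2 <;>
    by_cases h3 : c = 3 <;> by_cases h255 : c = 255 <;> simp_all <;> omega

-- the five counts sum to at most the length, with equality exactly when every byte is legal
theorem tally_le_iff (bs : List Int) :
    bs.count 0 + bs.count 1 + bs.count 2 + bs.count 3 + bs.count 255 ≤ bs.length ∧
    ((bs.count 0 + bs.count 1 + bs.count 2 + bs.count 3 + bs.count 255 = bs.length) ↔
      bs.all pvGood0 = true) := by
  induction bs with
  | nil => simp
  | cons c t ih =>
    obtain ⟨hle, hiff⟩ := ih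
    rw [tally_step]
    simp only [List.length_cons, List.all_cons, Bool.and_eq_true]
    by_cases hg : pvGood0 c = true
    · rw [if_pos hg]
      refine ⟨by omega, ?_⟩
      constructor
      · intro h; exact ⟨hg, hiff.mp (by omega)⟩
      · rintro ⟨-, h⟩; have := hiff.mpr h; omega
    · rw [if_neg hg]
      refine ⟨by omega, ?_⟩
      constructor
      · intro h; omega
      · rintro ⟨h, -⟩; exact absurd h hg

theorem drop_len_sub_one (c : Int) (t : List Int) :
    (c :: t).drop ((c :: t).length - 1) = [(c :: t).getLastD 0] := by
  induction t generalizing c with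
  | nil => rfl
  | cons d r ih => simpa using ih d

theorem char_eq_alt (bs : List Int) : pvChar bs = is_delim_alt bs := by
  cases bs with
  | nil => decide
  | cons c t =>
    obtain ⟨hle, hiff⟩ := tally_le_iff (c :: t)
    have htally : ((c :: t).count 0 + (c :: t).count 1 + (c :: t).count 2 +
        (c :: t).count 3 + (c :: t).count 255 == (c :: t).length) = (c :: t).all pvGood0 := by
      cases hall : (c :: t).all pvGood0
      · exact beq_eq_false_iff_ne.mpr fun h => by simp [hiff.mp h] at hall
      · exact beq_iff_eq.mpr (hiff.mpr hall)
    have hhead : PySem.List.slice (c :: t) none (some 1) = [c] := by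
      rw [show (1 : Int) = ((1 : Nat) : Int) from rfl, PySem.List.slice_to_natCast]
      simp
    have htail : PySem.List.slice (c :: t) (some (-1)) none = [(c :: t).getLastD 0] := by
      rw [PySem.List.slice_from_neg_one, drop_len_sub_one]
    simp only [is_delim_alt, htally, hhead, htail, pvChar, List.isEmpty_cons,
      Bool.false_or, List.contains_cons, List.contains_nil, Bool.or_false, List.headI]
    by_cases hc : c = 0
    · subst hc; simp
    · by_cases hl : (c :: t).getLastD 0 = 0
      · rw [hl]; simp
      · have h1 : ((0 : Int) == c) = false := beq_eq_false_iff_ne.mpr (Ne.symm hc)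
        have h2 : ((0 : Int) == (c :: t).getLastD 0) = false :=
          beq_eq_false_iff_ne.mpr (Ne.symm hl)
        have h3 : (c != 0) = true := bne_iff_ne.mpr hc
        have h4 : ((c :: t).getLastD 0 != 0) = true := bne_iff_ne.mpr hl
        rw [h1, h2, h3, h4]
        simp

-- ===== VERDICT (by name: the statement is the Claim_ definition above) =====
theorem is_delim_spec : Claim_equal_is_delim := by
  unfold Claim_equal_is_delim Spec_is_delim
  intro bs _
  rw [a_eq_char, char_eq_alt]
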